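-- pv_equiv track=rewrite | github.com/DataDog/pathfinding-labs | scripts/migrate_permissions_phase1.py | replace_permissions_section
-- ===== SOURCE A (Python) =====
-- def replace_permissions_section(content, new_required_block, new_helpful_block):
--     """Replace the permissions section in the raw YAML content."""
--     # Find the permissions section and replace it
--     # We need to find the start of 'permissions:' and the start of the next section
--
--     lines = content.split("\n")
--     result_lines = []
--     i = 0
--     in_permissions = False
--     permissions_indent = 0
--     wrote_new = False
--
--     while i < len(lines):
--         line = lines[i]
--         stripped = line.strip()
--
--         if stripped == "permissions:":
--             in_permissions = True
--             permissions_indent = len(line) - len(line.lstrip())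
--             result_lines.append(line)  # Keep "permissions:"
--             i += 1
--
--             # Write the new required block
--             result_lines.append("  required:")
--             if new_required_block:
--                 result_lines.append(new_required_block)
--             result_lines.append("")
--
--             if new_helpful_block:
--                 result_lines.append("  helpful:")
--                 result_lines.append(new_helpful_block)
--
--             # Skip old content until we hit a new section or section separator
--             while i < len(lines):
--                 check_line = lines[i].strip()
--                 # Check if we hit a new top-level section (comment separator or key at same indent)
--                 if check_line.startswith("# ===") or (
--                     check_line and not check_line.startswith("#") and
--                     not check_line.startswith("-") and
--                     ":" in check_line and
--                     (len(lines[i]) - len(lines[i].lstrip())) <= permissions_indent and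
--                     check_line != "permissions:"
--                 ):
--                     break
--                 i += 1
--
--             wrote_new = True
--             continue
--
--         result_lines.append(line)
--         i += 1
--
--     return "\n".join(result_lines)
-- ===== SOURCE B (Python) =====
-- def _is_boundary(line, indent):
--     s = line.strip()
--     return s.startswith("# ===") or (
--         s != "" and not s.startswith("#") and not s.startswith("-")
--         and ":" in s
--         and (len(line) - len(line.lstrip())) <= indent
--         and s != "permissions:"
--     )
--
--
-- def _insert_lines(start, new_required_block, new_helpful_block):
--     out = [start, "  required:"]
--     if new_required_block:
--         out.append(new_required_block)
--     out.append("")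
--     if new_helpful_block:
--         out.extend(["  helpful:", new_helpful_block])
--     return out
--
--
-- def replace_permissions_section(content, new_required_block, new_helpful_block):
--     """Replace the permissions section in the raw YAML content."""
--     out = []
--     rest = content.split("\n")
--     while True:
--         # chunk of untouched lines up to the next 'permissions:' line
--         k = 0
--         while k < len(rest) and rest[k].strip() != "permissions:":
--             k += 1
--         out.extend(rest[:k])
--         if k == len(rest):
--             break
--         start = rest[k]
--         out.extend(_insert_lines(start, new_required_block, new_helpful_block))
--         # drop the old section body up to (not including) the next boundary
--         indent = len(start) - len(start.lstrip())
--         rest = rest[k + 1:]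
--         while rest and not _is_boundary(rest[0], indent):
--             rest = rest[1:]
--     return "\n".join(out)
-- ===== Notes on version B (the rewrite author's own statement) =====
-- stated objective: alternative
-- what changed: Replaced A's single index-driven state machine that interleaves copying lines with skipping the old section body by a two-phase chunking loop: take the untouched chunk up to the next 'permissions:' line, emit the replacement block, drop the old body up to the boundary, and repeat on the remainder.
import Mathlib
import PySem

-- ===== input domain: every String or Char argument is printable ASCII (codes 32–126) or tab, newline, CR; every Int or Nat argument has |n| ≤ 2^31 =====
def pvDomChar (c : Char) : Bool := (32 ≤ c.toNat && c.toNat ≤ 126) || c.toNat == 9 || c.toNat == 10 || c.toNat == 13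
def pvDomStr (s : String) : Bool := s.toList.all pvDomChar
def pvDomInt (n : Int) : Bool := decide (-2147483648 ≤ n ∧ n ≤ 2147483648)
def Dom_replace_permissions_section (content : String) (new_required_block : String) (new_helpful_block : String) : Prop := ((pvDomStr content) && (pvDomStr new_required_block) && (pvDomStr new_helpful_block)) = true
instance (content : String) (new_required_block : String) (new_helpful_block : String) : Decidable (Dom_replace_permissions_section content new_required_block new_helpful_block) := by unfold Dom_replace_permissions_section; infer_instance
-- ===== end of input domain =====

-- B replaces A's interleaved copy/skip state machine by a two-phase chunking loop
-- (takeWhile to the next 'permissions:' line, emit the replacement, dropWhile the old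
-- body); same cost, different decomposition (objective: alternative).

-- ===== PORT A =====
-- len(line) - len(line.lstrip())
def pvIndentA (line : String) : Int :=
  PySem.Str.len line - PySem.Str.len (PySem.Str.lstrip line)

-- the inner loop's break condition on lines[i]
def pvCheckA (permIndent : Int) (line : String) : Bool :=
  let c := PySem.Str.strip line
  PySem.Str.startswith c "# ===" ||
    (c != "" && !(PySem.Str.startswith c "#") && !(PySem.Str.startswith c "-") &&
      PySem.Str.isIn ":" c && decide (pvIndentA line ≤ permIndent) && c != "permissions:")

-- 'while i < len(lines): … i += 1' skipping until the break condition
def pvSkipA (permIndent : Int) : List String → List String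
  | [] => []
  | l :: rest => if pvCheckA permIndent l then l :: rest else pvSkipA permIndent rest

theorem pvSkipA_length_le (permIndent : Int) (l : List String) :
    (pvSkipA permIndent l).length ≤ l.length := by
  induction l with
  | nil => simp [pvSkipA]
  | cons a rest ih =>
    simp only [pvSkipA]
    split
    · simp
    · exact Nat.le_succ_of_le ih

-- the outer while loop over lines, accumulating result_lines
def pvLoopA (nr nh : String) : List String → List String
  | [] => []
  | line :: rest =>
    if PySem.Str.strip line == "permissions:" then
      [line, "  required:"] ++ (if nr != "" then [nr] else []) ++ [""] ++
        (if nh != "" then ["  helpful:", nh] else []) ++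
        pvLoopA nr nh (pvSkipA (pvIndentA line) rest)
    else
      line :: pvLoopA nr nh rest
termination_by l => l.length
decreasing_by
  · exact Nat.lt_succ_of_le (pvSkipA_length_le _ _)
  · simp

def replace_permissions_section (content : String) (new_required_block : String) (new_helpful_block : String) : String :=
  PySem.Str.join "\n" (pvLoopA new_required_block new_helpful_block ((PySem.Str.split? content "\n").getD []))

-- ===== PORT B =====
-- Source B's _is_boundary(line, indent)
def pvIsBoundaryB (line : String) (indent : Int) : Bool :=
  let s := PySem.Str.strip line
  PySem.Str.startswith s "# ===" ||
    (s != "" && !(PySem.Str.startswith s "#") && !(PySem.Str.startswith s "-") &&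
      PySem.Str.isIn ":" s &&
      decide (PySem.Str.len line - PySem.Str.len (PySem.Str.lstrip line) ≤ indent) &&
      s != "permissions:")

-- Source B's _insert_lines(start, new_required_block, new_helpful_block)
def pvInsertB (start nr nh : String) : List String :=
  [start, "  required:"] ++ (if nr != "" then [nr] else []) ++ [""] ++
    (if nh != "" then ["  helpful:", nh] else [])

-- Source B's outer while-True loop: chunk, insert, drop the old body, repeat
def pvLoopB (nr nh : String) (rest : List String) : List String :=
  let pre := rest.takeWhile (fun l => PySem.Str.strip l != "permissions:")
  match h : rest.dropWhile (fun l => PySem.Str.strip l != "permissions:") with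
  | [] => pre
  | start :: tail =>
      pre ++ pvInsertB start nr nh ++
        pvLoopB nr nh (tail.dropWhile (fun l =>
          !(pvIsBoundaryB l (PySem.Str.len start - PySem.Str.len (PySem.Str.lstrip start)))))
termination_by rest.length
decreasing_by
  have h1 := List.length_dropWhile_le (fun l => PySem.Str.strip l != "permissions:") rest
  rw [h] at h1
  have h2 := List.length_dropWhile_le (fun l =>
    !(pvIsBoundaryB l (PySem.Str.len start - PySem.Str.len (PySem.Str.lstrip start)))) tail
  simp at h1
  omega

def replace_permissions_section_alt (content : String) (new_required_block : String) (new_helpful_block : String) : String :=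
  PySem.Str.join "\n" (pvLoopB new_required_block new_helpful_block ((PySem.Str.split? content "\n").getD []))

-- ===== PRECONDITION & SPEC =====
def Spec_replace_permissions_section (content : String) (new_required_block : String) (new_helpful_block : String) (out : String) : Prop := out = replace_permissions_section_alt content new_required_block new_helpful_block
instance (content : String) (new_required_block : String) (new_helpful_block : String) (out : String) : Decidable (Spec_replace_permissions_section content new_required_block new_helpful_block out) := by unfold Spec_replace_permissions_section; infer_instance

-- ===== CLAIM (what is proved, stated in full; the proofs are below) =====
def Claim_equal_replace_permissions_section : Prop := ∀ (content : String) (new_required_block : String) (new_helpful_block : String), Dom_replace_permissions_section content new_required_block new_helpful_block → Spec_replace_permissions_section content new_required_block new_helpful_block (replace_permissions_section content new_required_block new_helpful_block)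

-- ===== LEMMAS AND PROOFS =====
theorem pvSkipA_eq_dropWhile (permIndent : Int) (l : List String) :
    pvSkipA permIndent l = l.dropWhile (fun x => !(pvIsBoundaryB x permIndent)) := by
  induction l with
  | nil => rfl
  | cons a rest ih =>
    simp only [pvSkipA, List.dropWhile_cons]
    have hab : pvCheckA permIndent a = pvIsBoundaryB a permIndent := rfl
    rw [hab]
    cases hb : pvIsBoundaryB a permIndent <;> simp [ih]

theorem pvLoopB_of_nil (nr nh : String) (rest : List String)
    (h : rest.dropWhile (fun l => PySem.Str.strip l != "permissions:") = []) :
    pvLoopB nr nh rest = rest.takeWhile (fun l => PySem.Str.strip l != "permissions:") := by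
  rw [pvLoopB]
  split
  · rfl
  · next start tail heq => rw [h] at heq; exact absurd heq (by simp)

theorem pvLoopB_of_cons (nr nh : String) (rest : List String) (start : String) (tail : List String)
    (h : rest.dropWhile (fun l => PySem.Str.strip l != "permissions:") = start :: tail) :
    pvLoopB nr nh rest =
      rest.takeWhile (fun l => PySem.Str.strip l != "permissions:") ++ pvInsertB start nr nh ++
        pvLoopB nr nh (tail.dropWhile (fun l =>
          !(pvIsBoundaryB l (PySem.Str.len start - PySem.Str.len (PySem.Str.lstrip start))))) := by
  rw [pvLoopB]
  split
  · next heq => rw [h] at heq; exact absurd heq (by simp)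
  · next s t heq =>
    rw [h] at heq
    cases heq
    rfl

theorem pvLoop_eq (nr nh : String) : ∀ (n : Nat) (rest : List String), rest.length ≤ n →
    pvLoopA nr nh rest = pvLoopB nr nh rest := by
  intro n
  induction n with
  | zero =>
    intro rest h
    have hr : rest = [] := List.eq_nil_of_length_eq_zero (Nat.le_zero.mp h)
    subst hr
    rw [pvLoopB_of_nil nr nh [] (by rfl)]
    simp [pvLoopA]
  | succ n ih =>
    intro rest h
    match rest with
    | [] =>
      rw [pvLoopB_of_nil nr nh [] (by rfl)]
      simp [pvLoopA]
    | line :: rs =>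
      by_cases hp : PySem.Str.strip line = "permissions:"
      · have hdw : (line :: rs).dropWhile (fun l => PySem.Str.strip l != "permissions:")
            = line :: rs := by simp [List.dropWhile_cons, hp]
        rw [pvLoopA, pvLoopB_of_cons nr nh (line :: rs) line rs hdw]
        have htw : (line :: rs).takeWhile (fun l => PySem.Str.strip l != "permissions:")
            = [] := by simp [List.takeWhile_cons, hp]
        rw [htw]
        simp only [hp, beq_self_eq_true, if_pos]
        rw [pvSkipA_eq_dropWhile]
        have hind : pvIndentA line = PySem.Str.len line - PySem.Str.len (PySem.Str.lstrip line) := rfl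
        rw [hind]
        have hlen : (rs.dropWhile (fun l =>
            !(pvIsBoundaryB l (PySem.Str.len line - PySem.Str.len (PySem.Str.lstrip line))))).length ≤ n := by
          have := List.length_dropWhile_le (fun l =>
            !(pvIsBoundaryB l (PySem.Str.len line - PySem.Str.len (PySem.Str.lstrip line)))) rs
          simp at h
          omega
        rw [ih _ hlen]
        simp [pvInsertB]
      · rw [pvLoopA]
        simp only [show (PySem.Str.strip line == "permissions:") = false by simp [hp]]
        simp only [if_false, Bool.false_eq_true]
        cases hd : rs.dropWhile (fun l => PySem.Str.strip l != "permissions:") with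
        | nil =>
          have h1 : (line :: rs).dropWhile (fun l => PySem.Str.strip l != "permissions:") = [] := by
            simp [List.dropWhile_cons, hp, hd]
          rw [pvLoopB_of_nil nr nh _ h1, ih rs (by simp at h; omega),
            pvLoopB_of_nil nr nh rs hd]
          simp [List.takeWhile_cons, hp]
        | cons start tail =>
          have h1 : (line :: rs).dropWhile (fun l => PySem.Str.strip l != "permissions:")
              = start :: tail := by simp [List.dropWhile_cons, hp, hd]
          rw [pvLoopB_of_cons nr nh _ start tail h1, ih rs (by simp at h; omega),
            pvLoopB_of_cons nr nh rs start tail hd]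
          simp [List.takeWhile_cons, hp]

-- ===== VERDICT (by name: the statement is the Claim_ definition above) =====
theorem replace_permissions_section_spec : Claim_equal_replace_permissions_section := by
  intro content nr nh _
  unfold Spec_replace_permissions_section replace_permissions_section replace_permissions_section_alt
  rw [pvLoop_eq nr nh ((PySem.Str.split? content "\n").getD []).length _ le_rfl]
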